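-- pv_equiv track=rewrite | github.com/ychoi-atop/coding-agent | autodev/gui_mvp_dto.py | _extract_run_bounds
-- ===== SOURCE A (Python) =====
-- from typing import Any
--
-- def _extract_run_bounds(events: list[dict[str, Any]]) -> tuple[str, str]:
--     started_at = ""
--     completed_at = ""
--     for ev in events:
--         event_type = str(ev.get("event_type") or "")
--         ts = str(ev.get("timestamp") or "")
--         if event_type == "run.start" and ts and not started_at:
--             started_at = ts
--         elif event_type == "run.completed" and ts and not completed_at:
--             completed_at = ts
--     return started_at, completed_at
-- ===== SOURCE B (Python) =====
-- def _extract_run_bounds(events):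
--     def _first_ts(etype):
--         return next((str(ev.get("timestamp") or "") for ev in events
--                      if str(ev.get("event_type") or "") == etype
--                      and str(ev.get("timestamp") or "")), "")
--     return _first_ts("run.start"), _first_ts("run.completed")
-- ===== Notes on version B (the rewrite author's own statement) =====
-- stated objective: idiomatic
-- what changed: Replaces the single accumulating loop with state flags by two independent first-match lookups via next() over generator expressions, one per event type; this is valid because the elif branches are mutually exclusive per event.
import Mathlib
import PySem

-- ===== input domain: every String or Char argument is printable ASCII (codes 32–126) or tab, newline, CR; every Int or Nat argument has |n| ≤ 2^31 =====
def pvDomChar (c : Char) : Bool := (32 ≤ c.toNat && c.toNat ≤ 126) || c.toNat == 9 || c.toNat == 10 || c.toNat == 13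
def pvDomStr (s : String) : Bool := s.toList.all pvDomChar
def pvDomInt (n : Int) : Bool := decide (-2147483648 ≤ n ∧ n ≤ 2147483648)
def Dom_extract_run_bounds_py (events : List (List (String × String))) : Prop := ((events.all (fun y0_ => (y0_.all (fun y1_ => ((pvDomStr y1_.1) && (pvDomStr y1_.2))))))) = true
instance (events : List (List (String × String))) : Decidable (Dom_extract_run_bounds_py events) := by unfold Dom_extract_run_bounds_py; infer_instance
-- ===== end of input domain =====

-- B: two independent first-match lookups (next() over generator expressions) instead of A's single accumulating loop; idiomatic, same cost.
-- ===== PORT A =====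
-- str(ev.get(k) or ""): with string values this is the dict lookup with default "", since str is identity and "" or "" = "".
def pvGetS (ev : List (String × String)) (k : String) : String :=
  PySem.Dict.getD (PySem.Dict.mk ev) k ""

def extract_run_bounds_py (events : List (List (String × String))) : String × String :=
  events.foldl (fun acc ev =>
    let event_type := pvGetS ev "event_type"
    let ts := pvGetS ev "timestamp"
    if event_type = "run.start" ∧ ts ≠ "" ∧ acc.1 = "" then (ts, acc.2)
    else if event_type = "run.completed" ∧ ts ≠ "" ∧ acc.2 = "" then (acc.1, ts)
    else acc) ("", "")

-- ===== PORT B =====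
-- first_ts(etype): next((ts for ev in events if type matches and ts truthy), "")
def pvFirstTs (events : List (List (String × String))) (etype : String) : String :=
  match events.find? (fun ev => pvGetS ev "event_type" == etype && !(pvGetS ev "timestamp" == "")) with
  | some ev => pvGetS ev "timestamp"
  | none => ""

def extract_run_bounds_py_alt (events : List (List (String × String))) : String × String :=
  (pvFirstTs events "run.start", pvFirstTs events "run.completed")

-- ===== PRECONDITION & SPEC =====
def Spec_extract_run_bounds_py (events : List (List (String × String))) (out : String × String) : Prop := out = extract_run_bounds_py_alt events
instance (events : List (List (String × String))) (out : String × String) : Decidable (Spec_extract_run_bounds_py events out) := by unfold Spec_extract_run_bounds_py; infer_instance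

-- ===== CLAIM (what is proved, stated in full; the proofs are below) =====
def Claim_equal_extract_run_bounds_py : Prop := ∀ (events : List (List (String × String))), Dom_extract_run_bounds_py events → Spec_extract_run_bounds_py events (extract_run_bounds_py events)

-- ===== LEMMAS AND PROOFS =====

lemma pvFirstTs_cons (ev : List (String × String)) (evs : List (List (String × String))) (t : String) :
    pvFirstTs (ev :: evs) t =
      if pvGetS ev "event_type" = t ∧ pvGetS ev "timestamp" ≠ "" then pvGetS ev "timestamp"
      else pvFirstTs evs t := by
  simp only [pvFirstTs, List.find?]
  by_cases h : pvGetS ev "event_type" = t ∧ pvGetS ev "timestamp" ≠ ""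
  · have hts : (pvGetS ev "timestamp" == "") = false := by simp [h.2]
    simp [h.1, hts, h]
  · have : (pvGetS ev "event_type" == t && !(pvGetS ev "timestamp" == "")) = false := by
      by_contra hc
      simp only [Bool.not_eq_false, Bool.and_eq_true, beq_iff_eq, Bool.not_eq_true',
        beq_eq_false_iff_ne] at hc
      exact h hc
    simp [this, h]

lemma foldA_eq (evs : List (List (String × String))) (s c : String) :
    evs.foldl (fun acc ev =>
      let event_type := pvGetS ev "event_type"
      let ts := pvGetS ev "timestamp"
      if event_type = "run.start" ∧ ts ≠ "" ∧ acc.1 = "" then (ts, acc.2)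
      else if event_type = "run.completed" ∧ ts ≠ "" ∧ acc.2 = "" then (acc.1, ts)
      else acc) (s, c) =
    ((if s = "" then pvFirstTs evs "run.start" else s),
     (if c = "" then pvFirstTs evs "run.completed" else c)) := by
  induction evs generalizing s c with
  | nil => simp [pvFirstTs]
  | cons ev evs ih =>
    simp only [List.foldl_cons]
    rw [pvFirstTs_cons, pvFirstTs_cons]
    by_cases h1 : pvGetS ev "event_type" = "run.start" ∧ pvGetS ev "timestamp" ≠ "" ∧ s = ""
    · have hne : ¬ (pvGetS ev "event_type" = "run.completed" ∧ pvGetS ev "timestamp" ≠ "") := by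
        rintro ⟨h, -⟩; rw [h1.1] at h; exact absurd h (by decide)
      simp only [h1]
      rw [ih]
      simp [h1.2.1]
    · rw [if_neg h1]
      by_cases h2 : pvGetS ev "event_type" = "run.completed" ∧ pvGetS ev "timestamp" ≠ "" ∧ c = ""
      · have hne : ¬ (pvGetS ev "event_type" = "run.start" ∧ pvGetS ev "timestamp" ≠ "") := by
          rintro ⟨h, -⟩; rw [h2.1] at h; exact absurd h (by decide)
        rw [if_pos h2, ih]
        simp [h2.1, h2.2.1, h2.2.2]
      · rw [if_neg h2, ih]
        by_cases hs : s = ""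
        · by_cases hc : c = ""
          · -- both unset: neither branch fired, so the head event matches neither guard
            have hn1 : ¬ (pvGetS ev "event_type" = "run.start" ∧ pvGetS ev "timestamp" ≠ "") := by
              intro h; exact h1 ⟨h.1, h.2, hs⟩
            have hn2 : ¬ (pvGetS ev "event_type" = "run.completed" ∧ pvGetS ev "timestamp" ≠ "") := by
              intro h; exact h2 ⟨h.1, h.2, hc⟩
            simp [hs, hc, hn1, hn2]
          · have hn1 : ¬ (pvGetS ev "event_type" = "run.start" ∧ pvGetS ev "timestamp" ≠ "") := by
              intro h; exact h1 ⟨h.1, h.2, hs⟩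
            simp [hs, hc, hn1]
        · by_cases hc : c = ""
          · have hn2 : ¬ (pvGetS ev "event_type" = "run.completed" ∧ pvGetS ev "timestamp" ≠ "") := by
              intro h; exact h2 ⟨h.1, h.2, hc⟩
            simp [hs, hc, hn2]
          · simp [hs, hc]

-- ===== VERDICT =====
theorem extract_run_bounds_py_spec : Claim_equal_extract_run_bounds_py := by
  intro events _
  unfold Spec_extract_run_bounds_py extract_run_bounds_py extract_run_bounds_py_alt
  rw [foldA_eq]
  simp
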